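-- pv_equiv track=rewrite | github.com/uibcdf/PyPharmer | k-cliques.py | createOverlapMatrix
-- ===== SOURCE A (Python) =====
-- def createOverlapMatrix(cliqueList):
--     overlapMatrix = [[0 for _ in range(len(cliqueList))] for _ in range(len(cliqueList))]
--     cliquePos = 0
--     for clique in cliqueList:
--         compCliquePos = 0
--         for compClique in cliqueList:
--             overlapMatrix[cliquePos][compCliquePos] = len(set(clique).intersection(compClique))
--             compCliquePos = compCliquePos + 1
--         cliquePos = cliquePos + 1
--     # print (overlapMatrix)
--     return overlapMatrix
-- ===== SOURCE B (Python) =====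
-- def createOverlapMatrix(cliqueList):
--     # Dedup each clique once, compute only the upper triangle, and fill the
--     # lower triangle from already-computed rows (overlap is symmetric).
--     sets = [set(c) for c in cliqueList]
--     n = len(sets)
--     rows = []
--     for i in range(n):
--         row = [rows[j][i] for j in range(i)]
--         si = sets[i]
--         for j in range(i, n):
--             row.append(len(si & sets[j]))
--         rows.append(row)
--     return rows
-- ===== Notes on version B (the rewrite author's own statement) =====
-- stated objective: faster
-- what changed: B deduplicates each clique into a set once up front and computes only the upper triangle of intersections, filling each row's lower-triangle entries by reading the transposed entries of already-built rows (overlap size is symmetric), instead of A's full n^2 double loop that rebuilds set(clique) and intersects for every ordered pair.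
import Mathlib
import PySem

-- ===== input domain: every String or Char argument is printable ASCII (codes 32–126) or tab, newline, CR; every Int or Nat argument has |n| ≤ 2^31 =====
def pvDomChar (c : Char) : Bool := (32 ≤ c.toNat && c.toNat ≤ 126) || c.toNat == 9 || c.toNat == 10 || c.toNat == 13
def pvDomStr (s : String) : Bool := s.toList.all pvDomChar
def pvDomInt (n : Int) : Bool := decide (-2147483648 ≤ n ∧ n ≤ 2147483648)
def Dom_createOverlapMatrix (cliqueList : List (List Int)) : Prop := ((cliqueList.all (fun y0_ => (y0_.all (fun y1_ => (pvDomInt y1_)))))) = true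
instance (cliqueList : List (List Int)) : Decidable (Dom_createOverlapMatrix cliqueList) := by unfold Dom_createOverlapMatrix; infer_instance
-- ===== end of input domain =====

-- B dedups each clique once and computes only the upper triangle, mirroring the lower
-- triangle from already-built rows (overlap is symmetric); a constant-factor speedup.

-- ===== PORT A =====
-- A: for each clique and each compClique, entry = len(set(clique).intersection(compClique))
def createOverlapMatrix (cliqueList : List (List Int)) : List (List Int) :=
  cliqueList.map (fun clique =>
    cliqueList.map (fun compClique =>
      ((PySem.Set.inter (PySem.Set.ofList clique) compClique).length : Int)))

-- ===== PORT B =====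
-- B: sets = [set(c) for c in cliqueList]; row i = [rows[j][i] for j in range(i)]
--    followed by [len(sets[i] & sets[j]) for j in range(i, n)]
def createOverlapMatrix_alt (cliqueList : List (List Int)) : List (List Int) :=
  let sets := cliqueList.map PySem.Set.ofList
  let n : Int := sets.length
  (PySem.List.pyRange 0 n 1).foldl (fun rows i =>
    rows ++ [ (PySem.List.pyRange 0 i 1).map (fun j =>
                PySem.List.pyGetD (PySem.List.pyGetD rows j []) i 0)
              ++ (PySem.List.pyRange i n 1).map (fun j =>
                ((PySem.Set.inter (PySem.List.pyGetD sets i [])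
                                  (PySem.List.pyGetD sets j [])).length : Int)) ]) []

-- ===== PRECONDITION & SPEC =====
def Spec_createOverlapMatrix (cliqueList : List (List Int)) (out : List (List Int)) : Prop := out = createOverlapMatrix_alt cliqueList
instance (cliqueList : List (List Int)) (out : List (List Int)) : Decidable (Spec_createOverlapMatrix cliqueList out) := by unfold Spec_createOverlapMatrix; infer_instance

-- ===== CLAIM (what is proved, stated in full; the proofs are below) =====
def Claim_equal_createOverlapMatrix : Prop := ∀ (cliqueList : List (List Int)), Dom_createOverlapMatrix cliqueList → Spec_createOverlapMatrix cliqueList (createOverlapMatrix cliqueList)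

-- ===== LEMMAS AND PROOFS =====

-- the overlap count of cliques a and b (= A's entry)
def pvE (a b : List Int) : Int := ((PySem.Set.inter (PySem.Set.ofList a) b).length : Int)

-- B's loop body, with the clique list fixed
def pvStep (L : List (List Int)) (rows : List (List Int)) (i : Int) : List (List Int) :=
  rows ++ [ (PySem.List.pyRange 0 i 1).map (fun j =>
              PySem.List.pyGetD (PySem.List.pyGetD rows j []) i 0)
            ++ (PySem.List.pyRange i ((L.map PySem.Set.ofList).length : Int) 1).map (fun j =>
              ((PySem.Set.inter (PySem.List.pyGetD (L.map PySem.Set.ofList) i [])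
                                (PySem.List.pyGetD (L.map PySem.Set.ofList) j [])).length : Int)) ]

lemma pvAlt_eq_foldl (L : List (List Int)) :
    createOverlapMatrix_alt L
      = (PySem.List.pyRange 0 ((L.map PySem.Set.ofList).length : Int) 1).foldl (pvStep L) [] := rfl

lemma pvM_len (L : List (List Int)) : (createOverlapMatrix L).length = L.length := by
  simp [createOverlapMatrix]

lemma pvInter_ofList (a b : List Int) :
    PySem.Set.inter (PySem.Set.ofList a) (PySem.Set.ofList b)
      = PySem.Set.inter (PySem.Set.ofList a) b := by
  unfold PySem.Set.inter
  apply List.filter_congr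
  intro x hx
  simp [PySem.Set.mem_ofList]

lemma pvE_symm (a b : List Int) : pvE a b = pvE b a := by
  unfold pvE PySem.Set.inter
  have h1 : (List.filter (fun x => PySem.Set.contains b x) (PySem.Set.ofList a)).Nodup :=
    List.Nodup.filter _ (PySem.Set.nodup_ofList a)
  have h2 : (List.filter (fun x => PySem.Set.contains a x) (PySem.Set.ofList b)).Nodup :=
    List.Nodup.filter _ (PySem.Set.nodup_ofList b)
  have hp : (List.filter (fun x => PySem.Set.contains b x) (PySem.Set.ofList a)).Perm
      (List.filter (fun x => PySem.Set.contains a x) (PySem.Set.ofList b)) := by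
    refine (List.perm_ext_iff_of_nodup h1 h2).mpr ?_
    intro x
    simp only [List.mem_filter, PySem.Set.mem_ofList, PySem.Set.contains_eq_listContains,
      List.contains_iff_mem]
    exact and_comm
  exact_mod_cast hp.length_eq

lemma pvM_get (L : List (List Int)) (i : Nat) (hi : i < L.length) :
    (createOverlapMatrix L)[i]'(by rw [pvM_len]; exact hi)
      = L.map (fun d => pvE (L[i]'hi) d) := by
  simp [createOverlapMatrix, pvE]

lemma pvMap_split (g : List Int → Int) (L : List (List Int)) (k : Nat) (hk : k ≤ L.length) :
    L.map g
      = (PySem.List.pyRange 0 (k : Int) 1).map (fun j => g (PySem.List.pyGetD L j []))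
        ++ (PySem.List.pyRange (k : Int) (L.length : Int) 1).map (fun j => g (PySem.List.pyGetD L j [])) := by
  conv_lhs => rw [← PySem.List.map_pyGetD_pyRange_zero L ([] : List Int), List.map_map]
  simp only [PySem.List.len_eq, Function.comp_def]
  rw [PySem.List.pyRange_one_append 0 (k : Int) (L.length : Int)
    (Int.natCast_nonneg k) (by exact_mod_cast hk), List.map_append]

lemma pvRow_eq (L : List (List Int)) (k : Nat) (hk : k < L.length) :
    (PySem.List.pyRange 0 (k : Int) 1).map (fun j =>
        PySem.List.pyGetD (PySem.List.pyGetD ((createOverlapMatrix L).take k) j []) (k : Int) 0)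
      ++ (PySem.List.pyRange (k : Int) ((L.map PySem.Set.ofList).length : Int) 1).map (fun j =>
        ((PySem.Set.inter (PySem.List.pyGetD (L.map PySem.Set.ofList) (k : Int) [])
                          (PySem.List.pyGetD (L.map PySem.Set.ofList) j [])).length : Int))
      = (createOverlapMatrix L)[k]'(by rw [pvM_len]; exact hk) := by
  have htk : ((createOverlapMatrix L).take k).length = k := by
    rw [List.length_take, pvM_len]; exact min_eq_left hk.le
  rw [pvM_get L k hk]
  rw [pvMap_split (fun d => pvE (L[k]'hk) d) L k hk.le]
  simp only [List.length_map]
  congr 1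
  · apply List.map_congr_left
    intro j hj
    rw [PySem.List.mem_pyRange_one] at hj
    obtain ⟨h0, hjk⟩ := hj
    have hjN : j.toNat < k := by omega
    rw [PySem.List.pyGetD_eq_getElem ((createOverlapMatrix L).take k) ([] : List Int) h0
      (by rw [htk]; exact_mod_cast hjk)]
    rw [List.getElem_take]
    rw [pvM_get L j.toNat (by omega)]
    rw [PySem.List.pyGetD_natCast]
    rw [List.getD_eq_getElem _ _ (by simpa using hk)]
    rw [List.getElem_map]
    rw [pvE_symm]
    rw [PySem.List.pyGetD_eq_getElem L ([] : List Int) h0 (by exact_mod_cast (by omega : j < (L.length : Int)))]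
  · apply List.map_congr_left
    intro j hj
    rw [PySem.List.mem_pyRange_one] at hj
    obtain ⟨hkj, hjn⟩ := hj
    have h0j : (0 : Int) ≤ j := le_trans (Int.natCast_nonneg k) hkj
    rw [PySem.List.pyGetD_natCast]
    rw [List.getD_eq_getElem _ _ (by simpa using hk)]
    rw [PySem.List.pyGetD_eq_getElem (L.map PySem.Set.ofList) ([] : PySem.Set Int) h0j
      (by simpa using hjn)]
    rw [PySem.List.pyGetD_eq_getElem L ([] : List Int) h0j (by simpa using hjn)]
    rw [List.getElem_map, List.getElem_map]
    rw [pvInter_ofList]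
    rfl

lemma pvStep_take (L : List (List Int)) (k : Nat) (hk : k < L.length) :
    pvStep L ((createOverlapMatrix L).take k) ((k : Nat) : Int)
      = (createOverlapMatrix L).take (k + 1) := by
  have hk' : k < (createOverlapMatrix L).length := by rw [pvM_len]; exact hk
  unfold pvStep
  rw [pvRow_eq L k hk]
  rw [List.take_add_one, List.getElem?_eq_getElem hk']
  rfl

lemma pvFold (L : List (List Int)) (k : Nat) (hk : k ≤ L.length) :
    (PySem.List.pyRange 0 ((k : Nat) : Int) 1).foldl (pvStep L) []
      = (createOverlapMatrix L).take k := by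
  induction k with
  | zero =>
    simp only [Nat.cast_zero, PySem.List.pyRange_one_eq_nil (le_refl (0 : Int)),
      List.foldl_nil, List.take_zero]
  | succ k ih =>
    have hcast : (((k + 1 : Nat)) : Int) = ((k : Nat) : Int) + 1 := by push_cast; ring
    rw [hcast, PySem.List.pyRange_one_succ_right (Int.natCast_nonneg k), List.foldl_append,
      ih (by omega)]
    simp only [List.foldl_cons, List.foldl_nil]
    exact pvStep_take L k (by omega)

-- ===== VERDICT (by name: the statement is the Claim_ definition above) =====
theorem createOverlapMatrix_spec : Claim_equal_createOverlapMatrix := by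
  intro L _
  unfold Spec_createOverlapMatrix
  rw [pvAlt_eq_foldl L]
  simp only [List.length_map]
  rw [pvFold L L.length (le_refl _)]
  rw [show (createOverlapMatrix L).take L.length = createOverlapMatrix L from by
    rw [← pvM_len L]; exact List.take_length]
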